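-- pv_equiv track=rewrite | github.com/prathameshks/CP | GFG/POTD_3_22.py | Smallestonleft
-- ===== SOURCE A (Python) =====
-- import bisect
--
-- def Smallestonleft(arr, n):
--     # Complete the function
--     ans = []
--     arr1 = []
--     for i in range(n):
--         bisect.insort(arr1, arr[i])
--         k = bisect.bisect_left(arr1, arr[i])
--         if k == 0:
--             ans.append(-1)
--         else:
--             ans.append(arr1[k - 1])
--
--     return ans
-- ===== SOURCE B (Python) =====
-- def Smallestonleft(arr, n):
--     # For each index, take the max of the strictly smaller elements in the
--     # prefix directly, instead of maintaining a bisect-sorted list.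
--     ans = []
--     for i in range(n):
--         smaller = [x for x in arr[:i] if x < arr[i]]
--         ans.append(max(smaller) if smaller else -1)
--     return ans
-- ===== Notes on version B (the rewrite author's own statement) =====
-- stated objective: simpler
-- what changed: B drops A's incrementally maintained bisect-sorted list (insort + bisect_left + neighbour lookup) and instead computes each answer directly as the max of the strictly smaller elements in the prefix arr[:i].
import Mathlib
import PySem

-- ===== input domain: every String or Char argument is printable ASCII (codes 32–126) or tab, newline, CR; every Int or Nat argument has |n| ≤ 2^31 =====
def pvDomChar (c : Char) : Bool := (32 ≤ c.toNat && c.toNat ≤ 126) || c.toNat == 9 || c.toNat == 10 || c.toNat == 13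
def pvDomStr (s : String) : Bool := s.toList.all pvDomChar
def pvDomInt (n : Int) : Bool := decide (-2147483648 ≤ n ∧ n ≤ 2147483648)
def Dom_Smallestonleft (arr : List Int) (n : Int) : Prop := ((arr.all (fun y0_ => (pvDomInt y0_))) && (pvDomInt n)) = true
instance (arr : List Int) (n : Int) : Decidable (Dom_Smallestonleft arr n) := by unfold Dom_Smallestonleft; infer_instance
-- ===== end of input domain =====

-- B replaces A's maintained bisect-sorted list by a direct per-index
-- max-of-smaller-prefix scan (objective: simpler; same return value).

-- ===== PORT A =====
-- bisect.insort / bisect.bisect_left are stdlib calls; ported as the PySem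
-- counterparts PySem.List.insertBy (insort's insertion rule) / PySem.List.bisectLeft.
def Smallestonleft (arr : List Int) (n : Int) : List Int :=
  (((PySem.List.pyRange 0 n 1).foldl
    (fun (st : List Int × List Int) i =>
      let x := (PySem.List.pyGet? arr i).getD 0   -- in range under Pre_
      let arr1 := PySem.List.insertBy (fun a b => decide (a < b)) x st.2
      let k := PySem.List.bisectLeft arr1 x
      if k = 0 then (st.1 ++ [(-1 : Int)], arr1)
      else (st.1 ++ [(PySem.List.pyGet? arr1 ((k : Int) - 1)).getD 0], arr1))
    ([], []))).1

-- ===== PORT B =====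
def Smallestonleft_alt (arr : List Int) (n : Int) : List Int :=
  (PySem.List.pyRange 0 n 1).foldl
    (fun (ans : List Int) i =>
      let x := (PySem.List.pyGet? arr i).getD 0   -- in range under Pre_
      let smaller := (PySem.List.slice arr none (some i)).filter (fun y => decide (y < x))
      ans ++ [if smaller = [] then (-1 : Int)
              else (PySem.List.max? smaller (fun y => y)).getD (-1)])
    []

-- ===== PRECONDITION & SPEC =====
-- A indexes arr[i] for i in range(n): it raises IndexError iff n > len(arr).
def Pre_Smallestonleft (arr : List Int) (n : Int) : Prop := n ≤ arr.length
instance (arr : List Int) (n : Int) : Decidable (Pre_Smallestonleft arr n) := by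
  unfold Pre_Smallestonleft; infer_instance
def pvWitness_Smallestonleft : List Int × Int := ([3, 1, 2, 2, -1], 5)

def Spec_Smallestonleft (arr : List Int) (n : Int) (out : List Int) : Prop := out = Smallestonleft_alt arr n
instance (arr : List Int) (n : Int) (out : List Int) : Decidable (Spec_Smallestonleft arr n out) := by unfold Spec_Smallestonleft; infer_instance

-- ===== CLAIM (what is proved, stated in full; the proofs are below) =====
def Claim_equal_Smallestonleft : Prop := ∀ (arr : List Int) (n : Int), Dom_Smallestonleft arr n → Pre_Smallestonleft arr n → Spec_Smallestonleft arr n (Smallestonleft arr n)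

-- ===== LEMMAS AND PROOFS =====

theorem insertBy_perm (x : Int) (s : List Int) :
    (PySem.List.insertBy (fun a b => decide (a < b)) x s).Perm (x :: s) := by
  induction s with
  | nil => simp [PySem.List.insertBy]
  | cons y ys ih =>
    by_cases h : x < y
    · simp [PySem.List.insertBy, h]
    · simp only [PySem.List.insertBy, decide_eq_true_eq, if_neg h]
      exact (ih.cons y).trans (List.Perm.swap x y ys)

theorem insertBy_sorted (x : Int) (s : List Int)
    (hs : s.Pairwise (· ≤ ·)) :
    (PySem.List.insertBy (fun a b => decide (a < b)) x s).Pairwise (· ≤ ·) := by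
  induction s with
  | nil => simp [PySem.List.insertBy]
  | cons y ys ih =>
    rcases List.pairwise_cons.mp hs with ⟨hy, hys⟩
    by_cases h : x < y
    · simp only [PySem.List.insertBy, decide_eq_true_eq, if_pos h]
      refine List.pairwise_cons.mpr ⟨?_, hs⟩
      intro z hz
      rcases List.mem_cons.mp hz with hz | hz
      · exact hz ▸ le_of_lt h
      · exact le_of_lt (lt_of_lt_of_le h (hy z hz))
    · simp only [PySem.List.insertBy, decide_eq_true_eq, if_neg h]
      refine List.pairwise_cons.mpr ⟨?_, ih hys⟩
      intro z hz
      rcases (PySem.List.mem_insertBy _ x z ys).mp hz with hz | hz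
      · exact hz ▸ le_of_not_gt h
      · exact hy z hz

-- the per-step value computed by A's bisect machinery equals B's max-of-smaller value
theorem step_value_eq (s p : List Int) (x : Int)
    (hs : s.Pairwise (· ≤ ·)) (hperm : s.Perm p) :
    (if PySem.List.bisectLeft (PySem.List.insertBy (fun a b => decide (a < b)) x s) x = 0
     then (-1 : Int)
     else (PySem.List.pyGet? (PySem.List.insertBy (fun a b => decide (a < b)) x s)
            ((PySem.List.bisectLeft (PySem.List.insertBy (fun a b => decide (a < b)) x s) x : Int) - 1)).getD 0)
    = (if p.filter (fun y => decide (y < x)) = [] then (-1 : Int)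
       else (PySem.List.max? (p.filter (fun y => decide (y < x))) (fun y => y)).getD (-1)) := by
  set t := PySem.List.insertBy (fun a b => decide (a < b)) x s with ht
  have htsorted : t.Pairwise (· ≤ ·) := insertBy_sorted x s hs
  have htperm : t.Perm (x :: s) := insertBy_perm x s
  set k := PySem.List.bisectLeft t x with hkdef
  obtain ⟨hk, h1, h2⟩ := hkdef ▸ PySem.List.bisectLeft_spec t x htsorted
  -- membership transfer between t and x :: p
  have hmem : ∀ y : Int, y ∈ t ↔ (y = x ∨ y ∈ p) := by
    intro y
    rw [htperm.mem_iff, List.mem_cons, hperm.mem_iff]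
  by_cases hk0 : k = 0
  · -- no element of t is < x, hence the filter over p is empty
    have hfil : p.filter (fun y => decide (y < x)) = [] := by
      rw [List.filter_eq_nil_iff]
      intro y hy
      have hyt : y ∈ t := (hmem y).mpr (Or.inr hy)
      obtain ⟨j, hj, hjy⟩ := List.mem_iff_getElem.mp hyt
      have := h2 j hj (hk0 ▸ Nat.zero_le j)
      simp only [decide_eq_true_eq]
      omega
    simp [hk0, hfil]
  · -- k = k' + 1; A returns t[k-1], which is the max of the smaller elements
    have hkpos : 0 < k := Nat.pos_of_ne_zero hk0
    have hklen : k - 1 < t.length := by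
      have : t ≠ [] := by
        intro h
        rw [h] at htperm
        exact absurd htperm.symm (by simp)
      have : 0 < t.length := List.length_pos_iff.mpr this
      omega
    have hmax_lt : t[k-1] < x := h1 (k-1) hklen (by omega)
    have hmax_mem : t[k-1] ∈ p.filter (fun y => decide (y < x)) := by
      rw [List.mem_filter]
      refine ⟨?_, by simpa using hmax_lt⟩
      rcases (hmem _).mp (List.getElem_mem hklen) with h | h
      · omega
      · exact h
    have hub : ∀ y ∈ p.filter (fun y => decide (y < x)), y ≤ t[k-1] := by
      intro y hy
      rw [List.mem_filter] at hy
      have hylt : y < x := by simpa using hy.2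
      have hyt : y ∈ t := (hmem y).mpr (Or.inr hy.1)
      obtain ⟨j, hj, hjy⟩ := List.mem_iff_getElem.mp hyt
      have hjk : j < k := by
        by_contra hge
        have := h2 j hj (by omega)
        omega
      subst hjy
      rcases Nat.lt_or_ge j (k-1) with hlt | hge
      · exact List.pairwise_iff_getElem.mp htsorted j (k-1) hj hklen hlt
      · have : j = k - 1 := by omega
        subst this; exact le_refl _
    have hfilne : p.filter (fun y => decide (y < x)) ≠ [] := by
      intro h; rw [h] at hmax_mem; exact absurd hmax_mem (by simp)
    -- max? returns some m; m = t[k-1] by antisymmetry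
    obtain ⟨m, hm⟩ : ∃ m, PySem.List.max? (p.filter (fun y => decide (y < x))) (fun y => y) = some m := by
      rcases h : PySem.List.max? (p.filter (fun y => decide (y < x))) (fun y => y) with _ | m
      · exact absurd ((PySem.List.max?_eq_none_iff _ _).mp h) hfilne
      · exact ⟨m, rfl⟩
    have hm_mem := PySem.List.max?_mem hm
    have hm_max := PySem.List.max?_isMax hm
    have hmeq : m = t[k-1] := le_antisymm (hub m hm_mem) (hm_max _ hmax_mem)
    have hA : (PySem.List.pyGet? t ((k : Int) - 1)).getD 0 = t[k-1] := by
      have : ((k : Int) - 1) = ((k - 1 : Nat) : Int) := by omega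
      rw [this, PySem.List.pyGet?_natCast, List.getElem?_eq_getElem hklen, Option.getD_some]
    simp [hk0, hfilne, hA, hm, hmeq]

-- the loop invariant: after processing range(m), A's sorted list is a sorted
-- permutation of arr.take m and both answer accumulators coincide
theorem loop_invariant (arr : List Int) (m : Nat) (hm : m ≤ arr.length) :
    (((PySem.List.pyRange 0 (m : Int) 1).foldl
        (fun (st : List Int × List Int) i =>
          let x := (PySem.List.pyGet? arr i).getD 0
          let arr1 := PySem.List.insertBy (fun a b => decide (a < b)) x st.2
          let k := PySem.List.bisectLeft arr1 x
          if k = 0 then (st.1 ++ [(-1 : Int)], arr1)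
          else (st.1 ++ [(PySem.List.pyGet? arr1 ((k : Int) - 1)).getD 0], arr1))
        ([], [])).1
      = (PySem.List.pyRange 0 (m : Int) 1).foldl
        (fun (ans : List Int) i =>
          let x := (PySem.List.pyGet? arr i).getD 0
          let smaller := (PySem.List.slice arr none (some i)).filter (fun y => decide (y < x))
          ans ++ [if smaller = [] then (-1 : Int)
                  else (PySem.List.max? smaller (fun y => y)).getD (-1)]) [])
    ∧ (((PySem.List.pyRange 0 (m : Int) 1).foldl
        (fun (st : List Int × List Int) i =>
          let x := (PySem.List.pyGet? arr i).getD 0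
          let arr1 := PySem.List.insertBy (fun a b => decide (a < b)) x st.2
          let k := PySem.List.bisectLeft arr1 x
          if k = 0 then (st.1 ++ [(-1 : Int)], arr1)
          else (st.1 ++ [(PySem.List.pyGet? arr1 ((k : Int) - 1)).getD 0], arr1))
        ([], [])).2.Perm (arr.take m))
    ∧ (((PySem.List.pyRange 0 (m : Int) 1).foldl
        (fun (st : List Int × List Int) i =>
          let x := (PySem.List.pyGet? arr i).getD 0
          let arr1 := PySem.List.insertBy (fun a b => decide (a < b)) x st.2
          let k := PySem.List.bisectLeft arr1 x
          if k = 0 then (st.1 ++ [(-1 : Int)], arr1)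
          else (st.1 ++ [(PySem.List.pyGet? arr1 ((k : Int) - 1)).getD 0], arr1))
        ([], [])).2.Pairwise (· ≤ ·)) := by
  induction m with
  | zero => simp [PySem.List.pyRange_one_eq_nil]
  | succ m ih =>
    obtain ⟨ih1, ih2, ih3⟩ := ih (by omega)
    have hmlen : m < arr.length := by omega
    have hsplit : PySem.List.pyRange 0 ((m + 1 : Nat) : Int) 1
        = PySem.List.pyRange 0 (m : Int) 1 ++ [(m : Int)] := by
      push_cast
      exact PySem.List.pyRange_one_succ_right (by positivity)
    rw [hsplit]
    simp only [List.foldl_append, List.foldl_cons, List.foldl_nil]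
    have hx : (PySem.List.pyGet? arr ((m : Nat) : Int)).getD 0 = arr[m] := by
      rw [PySem.List.pyGet?_natCast, List.getElem?_eq_getElem hmlen, Option.getD_some]
    have hslice : PySem.List.slice arr none (some ((m : Nat) : Int)) = arr.take m :=
      PySem.List.slice_to_natCast arr m
    set st := (PySem.List.pyRange 0 (m : Int) 1).foldl
        (fun (st : List Int × List Int) i =>
          let x := (PySem.List.pyGet? arr i).getD 0
          let arr1 := PySem.List.insertBy (fun a b => decide (a < b)) x st.2
          let k := PySem.List.bisectLeft arr1 x
          if k = 0 then (st.1 ++ [(-1 : Int)], arr1)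
          else (st.1 ++ [(PySem.List.pyGet? arr1 ((k : Int) - 1)).getD 0], arr1))
        ([], []) with hst
    have hval := step_value_eq st.2 (arr.take m) arr[m] ih3 ih2
    have htake : arr.take (m + 1) = arr.take m ++ [arr[m]] := by
      rw [List.take_add_one, List.getElem?_eq_getElem hmlen]; rfl
    refine ⟨?_, ?_, ?_⟩
    · simp only [hx, hslice]
      by_cases hc : PySem.List.bisectLeft
          (PySem.List.insertBy (fun a b => decide (a < b)) arr[m] st.2) arr[m] = 0 <;>
        simp only [hc, if_true, if_false] <;>
        · simp only [hc, reduceIte] at hval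
          rw [ih1, ← hval]
    · simp only [hx]
      by_cases hc : PySem.List.bisectLeft
          (PySem.List.insertBy (fun a b => decide (a < b)) arr[m] st.2) arr[m] = 0 <;>
        simp only [hc, reduceIte] <;>
        · rw [htake]
          exact (insertBy_perm arr[m] st.2).trans
            ((ih2.cons arr[m]).trans (List.perm_append_singleton arr[m] (arr.take m)).symm)
    · simp only [hx]
      by_cases hc : PySem.List.bisectLeft
          (PySem.List.insertBy (fun a b => decide (a < b)) arr[m] st.2) arr[m] = 0 <;>
        simp only [hc, reduceIte] <;>
        exact insertBy_sorted arr[m] st.2 ih3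

-- ===== VERDICT (by name: the statement is the Claim_ definition above) =====
theorem Smallestonleft_spec : Claim_equal_Smallestonleft := by
  intro arr n _ hpre
  unfold Spec_Smallestonleft Smallestonleft Smallestonleft_alt
  by_cases hn : n ≤ 0
  · rw [PySem.List.pyRange_one_eq_nil hn]
    rfl
  · have hnm : n = ((n.toNat : Nat) : Int) := by omega
    have hmle : n.toNat ≤ arr.length := by
      unfold Pre_Smallestonleft at hpre; omega
    rw [hnm]
    exact (loop_invariant arr n.toNat hmle).1
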